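-- pv_equiv track=rewrite | github.com/IKAROSOO/CodingTest | Programmers/Lv1 문제/140108_01.py | solution
-- ===== SOURCE A (Python) =====
-- def solution(s):
--     cnt = 0
--     index = 0
--
--     standard = s[index]
--     standard_cnt = 0
--     nonStandard_cnt = 0
--
--     while True:
--         if index >= len(s):
--             cnt += 1
--             break
--
--         if s[index] == standard:
--             standard_cnt += 1
--         else:
--             nonStandard_cnt += 1
--
--         if standard_cnt == nonStandard_cnt:
--             try:
--                 s = s[:0] + s[standard_cnt+nonStandard_cnt:]
--                 index, standard_cnt, nonStandard_cnt = 0, 0, 0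
--                 standard = s[index]
--                 cnt += 1
--                 continue
--             except:
--                 cnt += 1
--                 break
--
--         index += 1
--
--     return cnt
-- ===== SOURCE B (Python) =====
-- def solution(s):
--     cnt = 0
--     same = 0
--     diff = 0
--     std = ''
--     for ch in s:
--         if same == 0:
--             std = ch
--         if ch == std:
--             same += 1
--         else:
--             diff += 1
--         if same == diff:
--             cnt += 1
--             same = 0
--             diff = 0
--     if same != diff:
--         cnt += 1
--     return cnt
-- ===== Notes on version B (the rewrite author's own statement) =====
-- stated objective: faster
-- what changed: Replaced A's while-loop that re-slices the string and restarts indexing at every balance point with a single for-pass over the characters using two counters reset in place (no string copies).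
import Mathlib
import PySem

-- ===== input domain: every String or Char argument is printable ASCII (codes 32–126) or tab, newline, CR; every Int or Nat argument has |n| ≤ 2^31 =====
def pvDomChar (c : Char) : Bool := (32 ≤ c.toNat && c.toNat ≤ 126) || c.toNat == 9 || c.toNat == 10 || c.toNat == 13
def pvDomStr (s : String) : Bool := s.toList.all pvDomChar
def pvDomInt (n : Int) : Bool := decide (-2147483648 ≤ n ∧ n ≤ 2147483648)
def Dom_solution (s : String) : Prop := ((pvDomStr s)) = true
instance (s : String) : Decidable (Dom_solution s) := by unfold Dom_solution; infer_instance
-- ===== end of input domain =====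

-- B replaces A's re-slicing while-loop by one linear pass with two counters (return value only; A never mutates its argument observably).

-- ===== PORT A =====
-- A's while-loop: walks s with `index`; on a balance point slices s to the
-- remainder, resets everything and re-reads standard = s[0] (the `try`: an
-- empty remainder raises IndexError, caught as `cnt += 1; break`).
def pvLoopA (l : List Char) (index : Nat) (standard : Char) (sc nc : Nat) (cnt : Int) : Int :=
  if h : index < l.length then
    if l[index] = standard then
      if sc + 1 = nc then
        match hd : l.drop (sc + 1 + nc) with
        | [] => cnt + 1
        | c' :: t => pvLoopA (c' :: t) 0 c' 0 0 (cnt + 1)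
      else pvLoopA l (index + 1) standard (sc + 1) nc cnt
    else
      if sc = nc + 1 then
        match hd : l.drop (sc + (nc + 1)) with
        | [] => cnt + 1
        | c' :: t => pvLoopA (c' :: t) 0 c' 0 0 (cnt + 1)
      else pvLoopA l (index + 1) standard sc (nc + 1) cnt
  else
    cnt + 1
termination_by (l.length, l.length - index)
decreasing_by
  · have hlen : (l.drop (sc + 1 + nc)).length = l.length - (sc + 1 + nc) := List.length_drop ..
    rw [hd] at hlen
    exact Prod.Lex.left _ _ (by simp only [List.length_cons] at hlen ⊢; omega)
  · exact Prod.Lex.right _ (by omega)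
  · have hlen : (l.drop (sc + (nc + 1))).length = l.length - (sc + (nc + 1)) := List.length_drop ..
    rw [hd] at hlen
    exact Prod.Lex.left _ _ (by simp only [List.length_cons] at hlen ⊢; omega)
  · exact Prod.Lex.right _ (by omega)

def solution (s : String) : Int :=
  match s.toList with
  | [] => 0   -- Python: standard = s[0] raises IndexError here; excluded by Pre_solution
  | c :: t => pvLoopA (c :: t) 0 c 0 0 0

-- ===== PORT B =====
-- B: one pass; at a chunk start (same = 0) the standard is the current char.
def pvLoopB (l : List Char) (std : Char) (same diff : Nat) (cnt : Int) : Int :=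
  match l with
  | [] => if same ≠ diff then cnt + 1 else cnt
  | c :: t =>
    let std' := if same = 0 then c else std
    let same' := if c = std' then same + 1 else same
    let diff' := if c = std' then diff else diff + 1
    if same' = diff' then pvLoopB t std' 0 0 (cnt + 1)
    else pvLoopB t std' same' diff' cnt

def solution_alt (s : String) : Int := pvLoopB s.toList ' ' 0 0 0

-- ===== PRECONDITION & SPEC =====
-- Pre_ excludes only the empty string, on which A raises IndexError (standard = s[0] before the loop).
def Pre_solution (s : String) : Prop := s ≠ ""
instance (s : String) : Decidable (Pre_solution s) := by unfold Pre_solution; infer_instance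
def pvWitness_solution : String := "aabbac"

def Spec_solution (s : String) (out : Int) : Prop := out = solution_alt s
instance (s : String) (out : Int) : Decidable (Spec_solution s out) := by unfold Spec_solution; infer_instance

-- ===== CLAIM (what is proved, stated in full; the proofs are below) =====
def Claim_equal_solution : Prop := ∀ (s : String), Dom_solution s → Pre_solution s → Spec_solution s (solution s)

-- ===== LEMMAS AND PROOFS =====

-- With same = diff = 0 the carried standard is overwritten before use.
lemma pvLoopB_std_irrel (l : List Char) (a b : Char) (cnt : Int) :
    pvLoopB l a 0 0 cnt = pvLoopB l b 0 0 cnt := by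
  cases l with
  | nil => simp [pvLoopB]
  | cons c t => simp [pvLoopB]

-- Main bridge: A's state (l, index, std, sc, nc) with index = sc + nc and the
-- chunk invariants corresponds to B running on the unread suffix l.drop index.
lemma pvLoopAB (N : Nat) : ∀ (l : List Char) (index : Nat) (std : Char) (sc nc : Nat) (cnt : Int),
    2 * l.length - index ≤ N → l ≠ [] → index = sc + nc →
    ((sc = 0 ∧ nc = 0 ∧ (∀ c t, l = c :: t → std = c)) ∨ (0 < sc ∧ sc ≠ nc)) →
    pvLoopA l index std sc nc cnt = pvLoopB (l.drop index) std sc nc cnt := by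
  induction N with
  | zero =>
    intro l index std sc nc cnt hN hne hidx hinv
    have hlen : 0 < l.length := List.length_pos_iff.mpr hne
    have hge : ¬ index < l.length := by omega
    rw [pvLoopA, dif_neg hge, List.drop_eq_nil_of_le (by omega)]
    rcases hinv with ⟨h0, h0', _⟩ | ⟨hpos, hne'⟩
    · omega
    · simp [pvLoopB, hne']
  | succ N ih =>
    intro l index std sc nc cnt hN hne hidx hinv
    by_cases h : index < l.length
    · rw [pvLoopA, dif_pos h]
      have hdropc : l.drop index = l[index] :: l.drop (index + 1) :=
        List.drop_eq_getElem_cons h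
      rcases hinv with ⟨hsc0, hnc0, hstd⟩ | ⟨hpos, hne'⟩
      · -- chunk start: index = 0, std = head = l[0]
        subst hsc0; subst hnc0
        have hi0 : index = 0 := by omega
        subst hi0
        obtain ⟨c0, t0, hl⟩ : ∃ c0 t0, l = c0 :: t0 := by
          cases l with | nil => exact absurd rfl hne | cons a b => exact ⟨a, b, rfl⟩
        have hstdc : std = l[0] := by
          subst hl; simpa using hstd c0 t0 rfl
        rw [hdropc, hstdc]
        simp only [pvLoopB]
        simp only [Nat.zero_add, if_true]
        exact ih l 1 l[0] 1 0 cnt (by omega) hne rfl (Or.inr (by omega))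
      · -- inside a chunk: sc > 0, sc ≠ nc
        have hsne : ¬ sc = 0 := by omega
        rw [hdropc, pvLoopB]
        simp only [if_neg hsne]
        by_cases hcs : l[index] = std
        · simp only [hcs, if_true]
          by_cases hb : sc + 1 = nc
          · rw [if_pos hb, if_pos hb]
            have hsum : sc + 1 + nc = index + 1 := by omega
            split
            next hd =>
              rw [hsum] at hd
              rw [hd, pvLoopB]
              simp
            next c' t hd =>
              rw [hsum] at hd
              have hlen : t.length + 1 = l.length - (index + 1) := by
                have h2 := List.length_drop (l := l) (i := index + 1)
                rw [hd] at h2; simpa using h2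
              have hih := ih (c' :: t) 0 c' 0 0 (cnt + 1)
                (by simp only [List.length_cons]; omega) (by simp) rfl
                (Or.inl ⟨rfl, rfl, by intro a b hab; cases hab; rfl⟩)
              simp only [List.drop_zero] at hih
              rw [hd, hih, pvLoopB_std_irrel _ c' std]
          · rw [if_neg hb, if_neg hb]
            exact ih l (index + 1) std (sc + 1) nc cnt (by omega) hne (by omega)
              (Or.inr (by omega))
        · simp only [if_neg hcs]
          by_cases hb : sc = nc + 1
          · rw [if_pos hb, if_pos hb]
            have hsum : sc + (nc + 1) = index + 1 := by omega
            split
            next hd =>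
              rw [hsum] at hd
              rw [hd, pvLoopB]
              simp
            next c' t hd =>
              rw [hsum] at hd
              have hlen : t.length + 1 = l.length - (index + 1) := by
                have h2 := List.length_drop (l := l) (i := index + 1)
                rw [hd] at h2; simpa using h2
              have hih := ih (c' :: t) 0 c' 0 0 (cnt + 1)
                (by simp only [List.length_cons]; omega) (by simp) rfl
                (Or.inl ⟨rfl, rfl, by intro a b hab; cases hab; rfl⟩)
              simp only [List.drop_zero] at hih
              rw [hd, hih, pvLoopB_std_irrel _ c' std]
          · rw [if_neg hb, if_neg hb]
            exact ih l (index + 1) std sc (nc + 1) cnt (by omega) hne (by omega)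
              (Or.inr (by omega))
    · rw [pvLoopA, dif_neg h, List.drop_eq_nil_of_le (by omega)]
      rcases hinv with ⟨h0, h0', _⟩ | ⟨hpos, hne'⟩
      · have : 0 < l.length := List.length_pos_iff.mpr hne
        omega
      · simp [pvLoopB, hne']

-- ===== VERDICT (by name: the statement is the Claim_ definition above) =====
theorem solution_spec : Claim_equal_solution := by
  intro s _ hpre
  unfold Spec_solution solution solution_alt
  cases hl : s.toList with
  | nil =>
    have : s = "" := String.toList_inj.mp (by simp [hl])
    exact absurd this hpre
  | cons c t =>
    have h := pvLoopAB (2 * (c :: t).length) (c :: t) 0 c 0 0 0 (by omega) (by simp) rfl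
      (Or.inl ⟨rfl, rfl, by intro a b hab; cases hab; rfl⟩)
    simp only [List.drop_zero] at h
    show pvLoopA (c :: t) 0 c 0 0 0 = pvLoopB (c :: t) ' ' 0 0 0
    rw [h, pvLoopB_std_irrel _ c ' ']
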